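-- pv_equiv track=rewrite | github.com/croatis/OptimizingTrafficLightsWithML | Driver.py | getThroughput
-- ===== SOURCE A (Python) =====
-- def getThroughput(trafficLight, carsWaitingBefore, carsWaitingAfter):
--     if not carsWaitingBefore:
--         return 0
--     elif not carsWaitingAfter:
--         return len(carsWaitingBefore)
--     else:
--         carsThrough = { k : carsWaitingBefore[k] for k in set(carsWaitingBefore) - set(carsWaitingAfter) }
--         return len(carsThrough)
-- ===== SOURCE B (Python) =====
-- def getThroughput(trafficLight, carsWaitingBefore, carsWaitingAfter):
--     return len(set(carsWaitingBefore) | set(carsWaitingAfter)) - len(carsWaitingAfter)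
-- ===== Notes on version B (the rewrite author's own statement) =====
-- stated objective: alternative
-- what changed: B computes the answer by inclusion-exclusion -- the size of the union of the two key sets minus the size of the after dict -- instead of A's guarded set-difference plus dict-comprehension; no membership filtering of before's keys and no intermediate dict.
import Mathlib
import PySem

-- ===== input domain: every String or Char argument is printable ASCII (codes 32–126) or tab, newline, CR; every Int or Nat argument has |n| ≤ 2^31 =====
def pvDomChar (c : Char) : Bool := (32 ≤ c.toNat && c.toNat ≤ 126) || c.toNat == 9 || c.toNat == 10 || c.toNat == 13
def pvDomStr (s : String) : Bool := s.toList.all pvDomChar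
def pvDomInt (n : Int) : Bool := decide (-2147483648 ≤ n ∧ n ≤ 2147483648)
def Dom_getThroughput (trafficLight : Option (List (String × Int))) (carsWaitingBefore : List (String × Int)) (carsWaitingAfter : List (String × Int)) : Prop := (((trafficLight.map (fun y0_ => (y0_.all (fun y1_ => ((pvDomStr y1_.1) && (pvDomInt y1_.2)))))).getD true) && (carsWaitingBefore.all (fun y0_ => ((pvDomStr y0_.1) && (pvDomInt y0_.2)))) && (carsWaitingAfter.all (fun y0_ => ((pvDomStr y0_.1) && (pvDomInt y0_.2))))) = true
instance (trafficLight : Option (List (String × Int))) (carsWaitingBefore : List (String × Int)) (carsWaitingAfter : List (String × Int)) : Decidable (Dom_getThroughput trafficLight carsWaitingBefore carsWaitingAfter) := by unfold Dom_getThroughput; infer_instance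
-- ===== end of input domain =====

-- B replaces A's guarded set-difference/dict-comprehension body with a single inclusion-exclusion formula: |set(before) | set(after)| - len(after) (objective: alternative).


-- ===== PORT A =====
-- dict arguments are association lists; set(dict) iterates keys, len(dict) counts keys.
def getThroughput (trafficLight : Option (List (String × Int))) (carsWaitingBefore : List (String × Int)) (carsWaitingAfter : List (String × Int)) : Int :=
  if carsWaitingBefore = [] then 0
  else if carsWaitingAfter = [] then (carsWaitingBefore.length : Int)
  else
    let beforeDict := PySem.Dict.ofList carsWaitingBefore
    let diffKeys : PySem.Set String :=
      PySem.Set.diff (PySem.Set.ofList (carsWaitingBefore.map (·.1)))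
                     (PySem.Set.ofList (carsWaitingAfter.map (·.1)))
    -- {k : carsWaitingBefore[k] for k in diffKeys}; every k comes from beforeDict's keys, so getD's default is never taken
    let carsThrough := PySem.Dict.ofList (diffKeys.map (fun k => (k, beforeDict.getD k 0)))
    (carsThrough.size : Int)

-- ===== PORT B =====
-- len(set(carsWaitingBefore) | set(carsWaitingAfter)) - len(carsWaitingAfter)
def getThroughput_alt (trafficLight : Option (List (String × Int))) (carsWaitingBefore : List (String × Int)) (carsWaitingAfter : List (String × Int)) : Int :=
  ((PySem.Set.union (PySem.Set.ofList (carsWaitingBefore.map (·.1)))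
                    (PySem.Set.ofList (carsWaitingAfter.map (·.1)))).length : Int)
    - (carsWaitingAfter.length : Int)

-- ===== PRECONDITION & SPEC =====
-- Pre_ restricts the association lists to distinct keys: both dict parameters come from Python dicts,
-- which cannot contain duplicate keys, so duplicate-key lists correspond to no Python input.
def Pre_getThroughput (trafficLight : Option (List (String × Int))) (carsWaitingBefore : List (String × Int)) (carsWaitingAfter : List (String × Int)) : Prop :=
  (carsWaitingBefore.map Prod.fst).Nodup ∧ (carsWaitingAfter.map Prod.fst).Nodup
instance (trafficLight : Option (List (String × Int))) (carsWaitingBefore : List (String × Int)) (carsWaitingAfter : List (String × Int)) : Decidable (Pre_getThroughput trafficLight carsWaitingBefore carsWaitingAfter) := by unfold Pre_getThroughput; infer_instance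

def pvWitness_getThroughput : (Option (List (String × Int))) × (List (String × Int)) × (List (String × Int)) :=
  (none, [("a", 1), ("b", 2)], [("b", 3)])

def Spec_getThroughput (trafficLight : Option (List (String × Int))) (carsWaitingBefore : List (String × Int)) (carsWaitingAfter : List (String × Int)) (out : Int) : Prop := out = getThroughput_alt trafficLight carsWaitingBefore carsWaitingAfter
instance (trafficLight : Option (List (String × Int))) (carsWaitingBefore : List (String × Int)) (carsWaitingAfter : List (String × Int)) (out : Int) : Decidable (Spec_getThroughput trafficLight carsWaitingBefore carsWaitingAfter out) := by unfold Spec_getThroughput; infer_instance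

-- ===== CLAIM (what is proved, stated in full; the proofs are below) =====
def Claim_equal_getThroughput : Prop := ∀ (trafficLight : Option (List (String × Int))) (carsWaitingBefore : List (String × Int)) (carsWaitingAfter : List (String × Int)), Dom_getThroughput trafficLight carsWaitingBefore carsWaitingAfter → Pre_getThroughput trafficLight carsWaitingBefore carsWaitingAfter → Spec_getThroughput trafficLight carsWaitingBefore carsWaitingAfter (getThroughput trafficLight carsWaitingBefore carsWaitingAfter)

-- ===== LEMMAS AND PROOFS =====

-- inclusion-exclusion on nodup lists: |s \ t| = |s ∪ t| - |t|
theorem incl_excl (s t : List String) (hs : s.Nodup) (ht : t.Nodup) :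
    ((PySem.Set.diff s t).length : Int) = ((PySem.Set.union s t).length : Int) - (t.length : Int) := by
  have hd : (PySem.Set.diff s t).Nodup := PySem.Set.nodup_diff s t hs
  have hu : (PySem.Set.union s t).Nodup := PySem.Set.nodup_union s t hs
  have hdF : (PySem.Set.diff s t).toFinset = s.toFinset \ t.toFinset := by
    ext x; simp [PySem.Set.mem_diff]
  have huF : (PySem.Set.union s t).toFinset = s.toFinset ∪ t.toFinset := by
    ext x; simp [PySem.Set.mem_union]
  have hdl : (PySem.Set.diff s t).length = (s.toFinset \ t.toFinset).card := by
    rw [← hdF, List.toFinset_card_of_nodup hd]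
  have hul : (PySem.Set.union s t).length = (s.toFinset ∪ t.toFinset).card := by
    rw [← huF, List.toFinset_card_of_nodup hu]
  have htl : t.length = t.toFinset.card := (List.toFinset_card_of_nodup ht).symm
  have hcard : (s.toFinset \ t.toFinset).card + t.toFinset.card = (s.toFinset ∪ t.toFinset).card :=
    Finset.card_sdiff_add_card s.toFinset t.toFinset
  rw [hdl, hul, htl]; omega

theorem getThroughput_spec' (trafficLight : Option (List (String × Int))) (carsWaitingBefore : List (String × Int)) (carsWaitingAfter : List (String × Int))
    (hpre : Pre_getThroughput trafficLight carsWaitingBefore carsWaitingAfter) :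
    getThroughput trafficLight carsWaitingBefore carsWaitingAfter
      = getThroughput_alt trafficLight carsWaitingBefore carsWaitingAfter := by
  obtain ⟨hB, hA⟩ := hpre
  have hBn : (carsWaitingBefore.map (·.1)).Nodup := hB
  have hAn : (carsWaitingAfter.map (·.1)).Nodup := hA
  have hBset : PySem.Set.ofList (carsWaitingBefore.map (·.1)) = carsWaitingBefore.map (·.1) :=
    PySem.Set.ofList_eq_self_of_nodup _ hBn
  have hAset : PySem.Set.ofList (carsWaitingAfter.map (·.1)) = carsWaitingAfter.map (·.1) :=
    PySem.Set.ofList_eq_self_of_nodup _ hAn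
  unfold getThroughput getThroughput_alt
  by_cases hb : carsWaitingBefore = []
  · subst hb
    have hu : PySem.Set.union ([] : PySem.Set String) (List.map (fun x => x.1) carsWaitingAfter)
        = List.map (fun x => x.1) carsWaitingAfter := by
      have h1 : PySem.Set.union ([] : PySem.Set String) (List.map (fun x => x.1) carsWaitingAfter)
          = PySem.Set.ofList (List.map (fun x => x.1) carsWaitingAfter) := by
        simp [PySem.Set.union, PySem.Set.update, PySem.Set.ofList_eq_foldl]
      rw [h1, hAset]
    simp [hAset, hu]
  · by_cases ha : carsWaitingAfter = []
    · subst ha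
      simp only [hb, if_false]
      rw [hBset]
      have hu : PySem.Set.union (carsWaitingBefore.map (·.1))
          (PySem.Set.ofList ((List.map (·.1) ([] : List (String × Int))))) = carsWaitingBefore.map (·.1) := rfl
      rw [hu]
      simp
    · simp only [hb, ha, if_false]
      have hdiff_nodup : (PySem.Set.diff (PySem.Set.ofList (carsWaitingBefore.map (·.1)))
          (PySem.Set.ofList (carsWaitingAfter.map (·.1)))).Nodup :=
        PySem.Set.nodup_diff _ _ (PySem.Set.nodup_ofList _)
      set diffKeys := PySem.Set.diff (PySem.Set.ofList (carsWaitingBefore.map (·.1)))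
          (PySem.Set.ofList (carsWaitingAfter.map (·.1))) with hdk
      have hsize : (PySem.Dict.ofList (diffKeys.map
            (fun k => (k, (PySem.Dict.ofList carsWaitingBefore).getD k 0)))).size
          = diffKeys.length := by
        have hkeys : (PySem.Dict.ofList (diffKeys.map
              (fun k => (k, (PySem.Dict.ofList carsWaitingBefore).getD k 0)))).keys
            = PySem.Set.ofList ((diffKeys.map
              (fun k => (k, (PySem.Dict.ofList carsWaitingBefore).getD k 0))).map Prod.fst) := by
          have := PySem.Dict.keys_foldl_insert_key
            (diffKeys.map (fun k => (k, (PySem.Dict.ofList carsWaitingBefore).getD k 0)))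
            (Prod.fst) (fun _ p => p.2) PySem.Dict.empty
          simpa [PySem.Dict.ofList, PySem.Set.update_nil_left, PySem.Dict.keys_empty] using this
        have hmapfst : (diffKeys.map
              (fun k => (k, (PySem.Dict.ofList carsWaitingBefore).getD k 0))).map Prod.fst
            = diffKeys := by
          simp [List.map_map, Function.comp_def]
        have hk2 : (PySem.Dict.ofList (diffKeys.map
              (fun k => (k, (PySem.Dict.ofList carsWaitingBefore).getD k 0)))).keys = diffKeys := by
          rw [hkeys, hmapfst, PySem.Set.ofList_eq_self_of_nodup _ hdiff_nodup]
        calc (PySem.Dict.ofList (diffKeys.map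
                (fun k => (k, (PySem.Dict.ofList carsWaitingBefore).getD k 0)))).size
            = (PySem.Dict.ofList (diffKeys.map
                (fun k => (k, (PySem.Dict.ofList carsWaitingBefore).getD k 0)))).keys.length := by
              simp [PySem.Dict.size, PySem.Dict.keys]
          _ = diffKeys.length := by rw [hk2]
      simp only [hsize]
      rw [hdk, hBset, hAset]
      rw [incl_excl _ _ hBn hAn, List.length_map]

-- ===== VERDICT (by name: the statement is the Claim_ definition above) =====
theorem getThroughput_spec : Claim_equal_getThroughput := by
  intro tl b a _ hpre
  exact getThroughput_spec' tl b a hpre
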